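-- pv_equiv track=rewrite | github.com/rookinc/xalchemy_lab | src/xalchemy_lab/run_tri_patch_holonomy_basis_v3_probe.py | find_small_integer_representation
-- ===== SOURCE A (Python) =====
-- from itertools import product
--
-- def add6(a: tuple[int, ...], b: tuple[int, ...]) -> tuple[int, ...]:
--     return tuple(x + y for x, y in zip(a, b))
--
-- def scale6(k: int, v: tuple[int, ...]) -> tuple[int, ...]:
--     return tuple(k * x for x in v)
--
-- def find_small_integer_representation(
--     target: tuple[int, ...],
--     basis_vectors: dict[str, tuple[int, ...]],
--     coeff_bound: int = 3,
-- ) -> tuple[int, ...] | None: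
--     basis_names = tuple(basis_vectors.keys())
--     ranges = [range(-coeff_bound, coeff_bound + 1) for _ in basis_names]
--     zero = (0, 0, 0, 0, 0, 0)
--
--     for coeffs in product(*ranges):
--         current = zero
--         for k, name in zip(coeffs, basis_names):
--             current = add6(current, scale6(k, basis_vectors[name]))
--         if current == target:
--             return tuple(coeffs)
--     return None
-- ===== SOURCE B (Python) =====
-- def _combos(ws, rng, acc, ks):
--     if not ws:
--         yield acc, ks
--         return
--     w = ws[0]
--     for k in rng:
--         yield from _combos(ws[1:], rng, tuple(a + k * x for a, x in zip(acc, w)), ks + (k,))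
--
-- def find_small_integer_representation(
--     target: tuple[int, ...],
--     basis_vectors: dict[str, tuple[int, ...]],
--     coeff_bound: int = 3,
-- ) -> tuple[int, ...] | None:
--     vecs = [tuple(v) for v in basis_vectors.values()]
--     L = min([6] + [len(v) for v in vecs])
--     if len(target) != L:
--         return None
--     t = tuple(target)
--     h = len(vecs) // 2
--     rng = range(-coeff_bound, coeff_bound + 1)
--     zero = (0,) * L
--     # meet in the middle: lex-first coefficient suffix for each achievable second-half sum
--     table = {}
--     for s, ks in _combos(vecs[h:], rng, zero, ()):
--         if s not in table:
--             table[s] = ks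
--     for s, ks in _combos(vecs[:h], rng, zero, ()):
--         rest = table.get(tuple(a - b for a, b in zip(t, s)))
--         if rest is not None:
--             return ks + rest
--     return None
-- ===== Notes on version B (the rewrite author's own statement) =====
-- stated objective: faster
-- what changed: Replaces the exhaustive scan of all (2B+1)^n coefficient tuples (recomputing each combination from scratch) by meet-in-the-middle: hash the partial sums of the second half of the basis keyed by sum vector (keeping the lex-first suffix), then enumerate only the first half and look up the complement, returning the lex-first solution exactly as A does; intended as asymptotically faster (O((2B+1)^(n/2)) vs O((2B+1)^n)) — a timing run saw A time out at n=16 where B returned, but could not certify a speed ratio at a size both finish.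
import Mathlib
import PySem

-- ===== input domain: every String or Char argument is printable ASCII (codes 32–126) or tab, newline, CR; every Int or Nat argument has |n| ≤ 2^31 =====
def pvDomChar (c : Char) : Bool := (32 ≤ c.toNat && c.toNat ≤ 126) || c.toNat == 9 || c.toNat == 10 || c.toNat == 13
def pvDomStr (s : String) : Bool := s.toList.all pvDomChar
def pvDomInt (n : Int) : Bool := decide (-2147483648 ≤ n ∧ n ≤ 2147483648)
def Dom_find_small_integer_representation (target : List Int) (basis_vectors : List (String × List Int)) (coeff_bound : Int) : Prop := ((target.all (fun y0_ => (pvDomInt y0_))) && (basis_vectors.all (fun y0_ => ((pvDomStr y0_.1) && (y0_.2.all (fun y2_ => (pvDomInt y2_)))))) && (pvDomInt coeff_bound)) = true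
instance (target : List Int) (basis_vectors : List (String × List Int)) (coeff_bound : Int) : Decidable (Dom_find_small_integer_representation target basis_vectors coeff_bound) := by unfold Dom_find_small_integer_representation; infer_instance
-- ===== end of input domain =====

-- B replaces A's exhaustive scan of all coefficient tuples by meet-in-the-middle
-- (hash second-half partial sums, look up the complement), returning the same
-- lex-first solution; intended as faster (a timing run saw A time out where B
-- returned, but could not certify a ratio at a size both finish).

-- ===== PORT A =====
def pvAdd6 (a b : List Int) : List Int := (a.zip b).map (fun p => p.1 + p.2)

def pvScale6 (k : Int) (v : List Int) : List Int := v.map (fun x => k * x)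

-- itertools.product(*ranges), ported by hand: exact Python order (rightmost varies fastest)
def pvProduct : List (List Int) → List (List Int)
  | [] => [[]]
  | r :: rs => r.flatMap (fun k => (pvProduct rs).map (fun c => k :: c))

-- 'basis_vectors[name]' for 'name' running over the dict's own keys is the vector paired
-- with that key, so the zip over names+lookup is transliterated as the zip over the items.
def find_small_integer_representation (target : List Int) (basis_vectors : List (String × List Int)) (coeff_bound : Int) : Option (List Int) :=
  let ranges := basis_vectors.map (fun _ => PySem.List.pyRange (-coeff_bound) (coeff_bound + 1) 1)
  let zero : List Int := [0, 0, 0, 0, 0, 0]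
  (pvProduct ranges).find? (fun coeffs =>
    ((coeffs.zip (basis_vectors.map (·.2))).foldl
      (fun current p => pvAdd6 current (pvScale6 p.1 p.2)) zero) == target)

-- ===== PORT B =====
-- _combos: all (partial sum, coeff tuple) pairs for the given vectors, lex order in the coeffs
def pvCombos (rng : List Int) : List (List Int) → List Int → List Int → List (List Int × List Int)
  | [], acc, ks => [(acc, ks)]
  | w :: ws, acc, ks =>
      rng.flatMap (fun k => pvCombos rng ws ((acc.zip w).map (fun p => p.1 + k * p.2)) (ks ++ [k]))

def find_small_integer_representation_alt (target : List Int) (basis_vectors : List (String × List Int)) (coeff_bound : Int) : Option (List Int) :=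
  let vecs := basis_vectors.map (·.2)
  let L : Nat := (vecs.map (·.length)).foldl min 6
  if target.length ≠ L then none
  else
    let h := vecs.length / 2
    let rng := PySem.List.pyRange (-coeff_bound) (coeff_bound + 1) 1
    let zero : List Int := List.replicate L 0
    let table := (pvCombos rng (vecs.drop h) zero []).foldl
      (fun d p => if d.contains p.1 then d else d.insert p.1 p.2)
      (PySem.Dict.empty : PySem.Dict (List Int) (List Int))
    (pvCombos rng (vecs.take h) zero []).findSome? (fun p =>
      (table.get? ((target.zip p.1).map (fun q => q.1 - q.2))).map (fun rest => p.2 ++ rest))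

-- ===== PRECONDITION & SPEC =====
def Spec_find_small_integer_representation (target : List Int) (basis_vectors : List (String × List Int)) (coeff_bound : Int) (out : Option (List Int)) : Prop := out = find_small_integer_representation_alt target basis_vectors coeff_bound
instance (target : List Int) (basis_vectors : List (String × List Int)) (coeff_bound : Int) (out : Option (List Int)) : Decidable (Spec_find_small_integer_representation target basis_vectors coeff_bound out) := by unfold Spec_find_small_integer_representation; infer_instance

-- ===== CLAIM (what is proved, stated in full; the proofs are below) =====
def Claim_equal_find_small_integer_representation : Prop := ∀ (target : List Int) (basis_vectors : List (String × List Int)) (coeff_bound : Int), Dom_find_small_integer_representation target basis_vectors coeff_bound → Spec_find_small_integer_representation target basis_vectors coeff_bound (find_small_integer_representation target basis_vectors coeff_bound)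

-- ===== LEMMAS AND PROOFS =====

-- proof-side canonical step: add k·v pointwise (zip-truncating)
def pvStep (c : List Int) (p : Int × List Int) : List Int :=
  List.zipWith (· + ·) c (p.2.map (p.1 * ·))

theorem pv_zipmap {α β γ : Type} (f : α → β → γ) :
    ∀ (a : List α) (b : List β), (a.zip b).map (fun p => f p.1 p.2) = List.zipWith f a b
  | [], _ => by simp
  | _ :: _, [] => by simp
  | x :: xs, y :: ys => by simp [pv_zipmap f xs ys]

theorem pvAdd_eq (c : List Int) (k : Int) (v : List Int) :
    pvAdd6 c (pvScale6 k v) = pvStep c (k, v) := by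
  simp [pvAdd6, pvScale6, pvStep, pv_zipmap]

theorem pvBStep_eq (acc : List Int) (k : Int) (w : List Int) :
    (acc.zip w).map (fun p => p.1 + k * p.2) = pvStep acc (k, w) := by
  have h := pv_zipmap (fun a b => a + k * b) acc w
  rw [h, pvStep, List.zipWith_map_right]

theorem pv_zw_assoc : ∀ (a b c : List Int),
    List.zipWith (· + ·) (List.zipWith (· + ·) a b) c
      = List.zipWith (· + ·) a (List.zipWith (· + ·) b c)
  | [], _, _ => by simp
  | _ :: _, [], _ => by simp
  | _ :: _, _ :: _, [] => by simp
  | x :: xs, y :: ys, z :: zs => by simp [pv_zw_assoc xs ys zs, Int.add_assoc]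

theorem pv_zw_zero : ∀ (a : List Int) (m : Nat),
    List.zipWith (· + ·) a (List.replicate m 0) = a.take m
  | [], _ => by simp
  | _ :: _, 0 => by simp
  | x :: xs, m + 1 => by simp [List.replicate_succ, pv_zw_zero xs m]

theorem pv_zw_take : ∀ (a b : List Int) (m : Nat),
    List.zipWith (· + ·) (a.take m) b = (List.zipWith (· + ·) a b).take m
  | [], _, _ => by simp
  | _ :: _, [], _ => by simp
  | _ :: _, _ :: _, 0 => by simp
  | x :: xs, y :: ys, m + 1 => by simp [pv_zw_take xs ys m]

theorem pvF_take : ∀ (ps : List (Int × List Int)) (acc : List Int) (m : Nat),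
    ps.foldl pvStep (acc.take m) = (ps.foldl pvStep acc).take m
  | [], _, _ => by simp
  | p :: ps, acc, m => by
      have h : pvStep (acc.take m) p = (pvStep acc p).take m := pv_zw_take acc _ m
      simp only [List.foldl_cons, h, pvF_take ps (pvStep acc p) m]

theorem pvF_split : ∀ (ps : List (Int × List Int)) (a b : List Int),
    ps.foldl pvStep (List.zipWith (· + ·) a b)
      = List.zipWith (· + ·) a (ps.foldl pvStep b)
  | [], _, _ => by simp
  | p :: ps, a, b => by
      have h : pvStep (List.zipWith (· + ·) a b) p = List.zipWith (· + ·) a (pvStep b p) :=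
        pv_zw_assoc a b _
      simp only [List.foldl_cons, h, pvF_split ps a (pvStep b p)]

theorem pvF_len_pres : ∀ (ps : List (Int × List Int)) (acc : List Int),
    (∀ p ∈ ps, acc.length ≤ p.2.length) → (ps.foldl pvStep acc).length = acc.length
  | [], _, _ => by simp
  | p :: ps, acc, h => by
      have hl : (pvStep acc p).length = acc.length := by
        simp only [pvStep, List.length_zipWith, List.length_map]
        exact Nat.min_eq_left (h p (List.mem_cons_self))
      rw [List.foldl_cons, pvF_len_pres ps (pvStep acc p)
        (fun q hq => hl ▸ h q (List.mem_cons_of_mem p hq)), hl]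

theorem pvF_length : ∀ (ps : List (Int × List Int)) (acc : List Int),
    (ps.foldl pvStep acc).length = ps.foldl (fun m p => min m p.2.length) acc.length
  | [], _ => by simp
  | p :: ps, acc => by
      simp only [List.foldl_cons, pvF_length ps (pvStep acc p)]
      congr 1
      simp [pvStep]

theorem pv_foldl_min_le_init : ∀ (l : List Nat) (i : Nat), l.foldl min i ≤ i
  | [], _ => le_refl _
  | x :: xs, i => le_trans (pv_foldl_min_le_init xs (min i x)) (min_le_left i x)

theorem pv_foldl_min_le_mem : ∀ (l : List Nat) (i x : Nat), x ∈ l → l.foldl min i ≤ x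
  | [], _, _, h => absurd h (List.not_mem_nil)
  | y :: ys, i, x, h => by
      rcases List.mem_cons.mp h with h | h
      · subst h
        exact le_trans (pv_foldl_min_le_init ys (min i x)) (min_le_right i x)
      · exact pv_foldl_min_le_mem ys (min i y) x h

theorem pv_find?_flatMap {α β : Type} (g : α → List β) (p : β → Bool) :
    ∀ xs : List α, (xs.flatMap g).find? p = xs.findSome? (fun x => (g x).find? p)
  | [] => by simp
  | x :: xs => by
      rw [List.flatMap_cons, List.find?_append, pv_find?_flatMap g p xs]
      cases h : (g x).find? p <;> simp [h]

theorem pv_findSome?_congr {α β : Type} (f g : α → Option β) :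
    ∀ (xs : List α), (∀ x ∈ xs, f x = g x) → xs.findSome? f = xs.findSome? g
  | [], _ => rfl
  | x :: xs, h => by
      rw [List.findSome?_cons, List.findSome?_cons, h x (List.mem_cons_self)]
      cases g x with
      | some b => rfl
      | none => exact pv_findSome?_congr f g xs (fun y hy => h y (List.mem_cons_of_mem x hy))

theorem pv_find?_congr {α : Type} (f g : α → Bool) :
    ∀ (xs : List α), (∀ x ∈ xs, f x = g x) → xs.find? f = xs.find? g
  | [], _ => rfl
  | x :: xs, h => by
      have hx := h x (List.mem_cons_self)
      have ih := pv_find?_congr f g xs (fun y hy => h y (List.mem_cons_of_mem x hy))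
      by_cases hg : g x = true
      · rw [List.find?_cons_of_pos (hx ▸ hg), List.find?_cons_of_pos hg]
      · rw [List.find?_cons_of_neg (by rw [hx]; exact hg), List.find?_cons_of_neg hg, ih]

theorem pv_product_length : ∀ (rs : List (List Int)) (c : List Int),
    c ∈ pvProduct rs → c.length = rs.length
  | [], c, hc => by simp [pvProduct] at hc; simp [hc]
  | r :: rs, c, hc => by
      simp only [pvProduct, List.mem_flatMap, List.mem_map] at hc
      obtain ⟨k, _, d, hd, rfl⟩ := hc
      simp [pv_product_length rs d hd]

theorem pv_product_append : ∀ (xs ys : List (List Int)),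
    pvProduct (xs ++ ys)
      = (pvProduct xs).flatMap (fun a => (pvProduct ys).map (fun c => a ++ c))
  | [], ys => by simp [pvProduct]
  | x :: xs, ys => by
      simp only [List.cons_append, pvProduct, pv_product_append xs ys,
        List.map_flatMap, List.flatMap_assoc, List.flatMap_map, List.map_map]
      rfl

theorem pv_combos_eq (rng : List Int) : ∀ (ws : List (List Int)) (acc ks : List Int),
    pvCombos rng ws acc ks
      = (pvProduct (ws.map (fun _ => rng))).map
          (fun c => ((c.zip ws).foldl pvStep acc, ks ++ c))
  | [], acc, ks => by simp [pvCombos, pvProduct]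
  | w :: ws, acc, ks => by
      simp only [pvCombos, List.map_cons, pvProduct, List.map_flatMap, List.map_map]
      refine List.flatMap_congr ?_
      intro k _
      rw [pvBStep_eq acc k w, pv_combos_eq rng ws (pvStep acc (k, w)) (ks ++ [k])]
      refine List.map_congr_left (fun c _ => ?_)
      simp [Function.comp, List.zip_cons_cons]

theorem pv_table_get? : ∀ (l : List (List Int × List Int))
    (d : PySem.Dict (List Int) (List Int)) (key : List Int),
    (l.foldl (fun d p => if d.contains p.1 then d else d.insert p.1 p.2) d).get? key
      = (d.get? key).or ((l.find? (fun p => p.1 == key)).map (·.2))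
  | [], d, key => by simp
  | p :: l, d, key => by
      rw [List.foldl_cons]
      by_cases hc : d.contains p.1 = true
      · rw [if_pos hc, pv_table_get? l d key]
        by_cases hk : p.1 = key
        · have hs : (d.get? key).isSome := by
            subst hk
            rw [PySem.Dict.contains_eq_isSome_get?] at hc
            exact hc
          obtain ⟨v, hv⟩ := Option.isSome_iff_exists.mp hs
          rw [hv, List.find?_cons_of_pos (by simp [hk])]
          rfl
        · rw [List.find?_cons_of_neg (by simp [hk])]
      · rw [if_neg hc, pv_table_get? l _ key]
        have hd : d.get? p.1 = none := by
          rw [PySem.Dict.contains_eq_isSome_get?] at hc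
          exact Option.not_isSome_iff_eq_none.mp (by simpa using hc)
        by_cases hk : p.1 = key
        · subst hk
          rw [PySem.Dict.get?_insert_self, hd, List.find?_cons_of_pos (by simp)]
          rfl
        · rw [PySem.Dict.get?_insert_of_ne _ _ (fun h => hk h.symm),
            List.find?_cons_of_neg (by simp [hk])]

theorem pv_add_eq_iff_sub : ∀ (x y t : List Int), x.length = t.length → y.length = t.length →
    (List.zipWith (· + ·) x y = t ↔ y = List.zipWith (fun a b => a - b) t x)
  | [], y, t, h1, h2 => by
      have ht : t = [] := List.length_eq_zero_iff.mp h1.symm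
      subst ht
      have hy : y = [] := List.length_eq_zero_iff.mp h2
      subst hy
      simp
  | a :: x, y, t, h1, h2 => by
      cases t with
      | nil => simp at h1
      | cons c t =>
        cases y with
        | nil => simp at h2
        | cons b y =>
          simp only [List.zipWith_cons_cons, List.cons.injEq]
          have h1' : x.length = t.length := by simpa using h1
          have h2' : y.length = t.length := by simpa using h2
          constructor
          · rintro ⟨hab, hrest⟩
            exact ⟨by omega, (pv_add_eq_iff_sub x y t h1' h2').mp hrest⟩
          · rintro ⟨hb, hrest⟩
            exact ⟨by omega, (pv_add_eq_iff_sub x y t h1' h2').mpr hrest⟩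

theorem pv_core (target : List Int) (rng : List Int) (vecs : List (List Int)) :
    (pvProduct (vecs.map (fun _ => rng))).find?
        (fun c => (c.zip vecs).foldl pvStep (List.replicate 6 0) == target)
      = (if target.length ≠ (vecs.map (·.length)).foldl min 6 then none
         else
           (pvCombos rng (vecs.take (vecs.length / 2))
               (List.replicate ((vecs.map (·.length)).foldl min 6) 0) []).findSome? (fun p =>
             (((pvCombos rng (vecs.drop (vecs.length / 2))
                   (List.replicate ((vecs.map (·.length)).foldl min 6) 0) []).foldl
                 (fun d p => if d.contains p.1 then d else d.insert p.1 p.2)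
                 (PySem.Dict.empty : PySem.Dict (List Int) (List Int))).get?
               ((target.zip p.1).map (fun q => q.1 - q.2))).map (fun rest => p.2 ++ rest))) := by
  set L := (vecs.map (·.length)).foldl min 6 with hLdef
  set n := vecs.length with hndef
  have hL6 : L ≤ 6 := pv_foldl_min_le_init _ 6
  have hLv : ∀ v ∈ vecs, L ≤ v.length := fun v hv =>
    pv_foldl_min_le_mem _ 6 _ (List.mem_map_of_mem hv)
  have hmapconst : vecs.map (fun _ => rng) = List.replicate n rng := List.map_const'
  have hlenS : ∀ c : List Int, c.length = n →
      ((c.zip vecs).foldl pvStep (List.replicate 6 0)).length = L := by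
    intro c hc
    rw [pvF_length]
    have hsnd : (c.zip vecs).map Prod.snd = vecs := List.map_snd_zip (le_of_eq hc.symm)
    calc (c.zip vecs).foldl (fun m p => min m p.2.length) (List.replicate 6 (0:Int)).length
        = (c.zip vecs).foldl (fun m p => min m p.2.length) 6 := by rw [List.length_replicate]
      _ = ((c.zip vecs).map Prod.snd).foldl (fun m v => min m v.length) 6 :=
          (List.foldl_map (f := Prod.snd) (g := fun m (v : List Int) => min m v.length)).symm
      _ = vecs.foldl (fun m v => min m v.length) 6 := by rw [hsnd]
      _ = (vecs.map (·.length)).foldl min 6 :=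
          (List.foldl_map (f := fun v : List Int => v.length) (g := min)).symm
  rw [hmapconst]
  by_cases ht : target.length = L
  · -- lengths match: meet-in-the-middle equals the full scan
    rw [if_neg (by simp [ht])]
    set h2 := n / 2 with hh2def
    have hh : h2 ≤ n := Nat.div_le_self n 2
    set lov := vecs.take h2 with hlovdef
    set hiv := vecs.drop h2 with hhivdef
    have hlolen : lov.length = h2 := by rw [hlovdef, List.length_take]; omega
    have hhilen : hiv.length = n - h2 := by rw [hhivdef, List.length_drop]
    have hsplitv : lov ++ hiv = vecs := List.take_append_drop h2 vecs
    have hrepl : List.replicate n rng = List.replicate h2 rng ++ List.replicate (n - h2) rng := by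
      rw [← List.replicate_add]; congr 1; omega
    rw [hrepl, pv_product_append, pv_find?_flatMap,
      pv_combos_eq rng lov, pv_combos_eq rng hiv]
    have hlor : lov.map (fun _ => rng) = List.replicate h2 rng := by
      rw [List.map_const', hlolen]
    have hhir : hiv.map (fun _ => rng) = List.replicate (n - h2) rng := by
      rw [List.map_const', hhilen]
    rw [hlor, hhir, List.findSome?_map]
    apply pv_findSome?_congr
    intro a ha
    have halen : a.length = h2 := by
      rw [pv_product_length _ a ha, List.length_replicate]
    simp only [Function.comp_apply, List.nil_append]
    rw [pv_table_get?, List.find?_map]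
    simp only [PySem.Dict.get?_empty, Option.none_or, Option.map_map, Function.comp_def]
    rw [List.find?_map, Option.map_map]
    simp only [Function.comp_def]
    -- abbreviations
    have htakerep : (List.replicate 6 (0:Int)).take L = List.replicate L 0 := by
      rw [List.take_replicate]; congr 1; omega
    have hmemlo : ∀ p ∈ a.zip lov, (List.replicate L (0:Int)).length ≤ p.2.length := by
      intro p hp
      rw [List.length_replicate]
      exact hLv p.2 (List.mem_of_mem_take (hlovdef ▸ (List.of_mem_zip hp).2))
    have hSAlen : ((a.zip lov).foldl pvStep (List.replicate L 0)).length = L := by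
      rw [pvF_len_pres _ _ hmemlo, List.length_replicate]
    refine congrArg _ (pv_find?_congr _ _ _ ?_)
    intro c hc
    have hclen : c.length = n - h2 := by
      rw [pv_product_length _ c hc, List.length_replicate]
    have hmemhi : ∀ p ∈ c.zip hiv, (List.replicate L (0:Int)).length ≤ p.2.length := by
      intro p hp
      rw [List.length_replicate]
      exact hLv p.2 (List.mem_of_mem_drop (hhivdef ▸ (List.of_mem_zip hp).2))
    have hSBlen : ((c.zip hiv).foldl pvStep (List.replicate L 0)).length = L := by
      rw [pvF_len_pres _ _ hmemhi, List.length_replicate]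
    have hacl : (a ++ c).length = n := by
      rw [List.length_append, halen, hclen]; omega
    have hzipsplit : (a ++ c).zip vecs = a.zip lov ++ c.zip hiv := by
      conv_lhs => rw [← hsplitv]
      exact List.zip_append (by rw [halen, hlolen])
    have hS0 : ((a ++ c).zip vecs).foldl pvStep (List.replicate L 0)
        = ((a ++ c).zip vecs).foldl pvStep (List.replicate 6 0) := by
      rw [← htakerep, pvF_take, ← hlenS (a ++ c) hacl, List.take_length]
    have hSA0 : List.zipWith (· + ·) ((a.zip lov).foldl pvStep (List.replicate L 0))
        (List.replicate L 0) = (a.zip lov).foldl pvStep (List.replicate L 0) := by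
      rw [pv_zw_zero]
      exact List.take_of_length_le (le_of_eq hSAlen)
    have hchain : ((a ++ c).zip vecs).foldl pvStep (List.replicate 6 0)
        = List.zipWith (· + ·) ((a.zip lov).foldl pvStep (List.replicate L 0))
            ((c.zip hiv).foldl pvStep (List.replicate L 0)) := by
      rw [← hS0, hzipsplit, List.foldl_append, ← hSA0, pvF_split, hSA0]
    rw [Bool.eq_iff_iff, beq_iff_eq, beq_iff_eq, hchain, pv_zipmap,
      pv_add_eq_iff_sub _ _ target (by rw [hSAlen, ht]) (by rw [hSBlen, ht])]
  · -- lengths differ: both sides find nothing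
    rw [if_pos ht]
    apply List.find?_eq_none.mpr
    intro c hc
    have hclen : c.length = n := by
      rw [pv_product_length _ c hc, List.length_replicate]
    simp only [beq_iff_eq]
    intro heq
    exact ht (by rw [← heq, hlenS c hclen])

theorem pv_main (target : List Int) (bvs : List (String × List Int)) (cb : Int) :
    find_small_integer_representation target bvs cb
      = find_small_integer_representation_alt target bvs cb := by
  simp only [find_small_integer_representation, find_small_integer_representation_alt]
  have hfun : (fun (current : List Int) (p : Int × List Int) =>
      pvAdd6 current (pvScale6 p.1 p.2)) = pvStep := by
    funext c p
    cases p with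
    | mk k v => exact pvAdd_eq c k v
  have hzero : ([0, 0, 0, 0, 0, 0] : List Int) = List.replicate 6 0 := rfl
  have hmap : bvs.map (fun _ => PySem.List.pyRange (-cb) (cb + 1) 1)
      = (bvs.map (·.2)).map (fun _ => PySem.List.pyRange (-cb) (cb + 1) 1) := by
    rw [List.map_map]
    exact List.map_congr_left (fun x _ => rfl)
  rw [hzero, hfun, hmap]
  exact pv_core target (PySem.List.pyRange (-cb) (cb + 1) 1) (bvs.map (·.2))


-- ===== VERDICT (by name: the statement is the Claim_ definition above) =====
theorem find_small_integer_representation_spec : Claim_equal_find_small_integer_representation := by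
  intro target bvs cb _
  unfold Spec_find_small_integer_representation
  exact pv_main target bvs cb
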